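-- pv_equiv track=rewrite | github.com/xeroxzen/merge-script | mergeablepairs.py | find_mergeable_pairs
-- ===== SOURCE A (Python) =====
-- def find_mergeable_pairs(dataframes):
--     mergeable_pairs = []
--     merged_filenames = set()
--
--     for filename1, (df1, key_column1) in dataframes.items():
--         if filename1 in merged_filenames:
--             continue  # Skip files that have already been merged
--
--         for filename2, (df2, key_column2) in dataframes.items():
--             if filename1 == filename2:
--                 continue  # Skip self-comparisons
--
--             # Check if the dataframes have a common key column
--             if key_column1 == key_column2 and key_column1 is not None:
--                 mergeable_pairs.append((filename1, filename2, key_column1))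
--                 merged_filenames.add(filename1)
--                 merged_filenames.add(filename2)
--
--     return mergeable_pairs
-- ===== SOURCE B (Python) =====
-- def find_mergeable_pairs(dataframes):
--     groups = {}
--     for filename, (df, key_column) in dataframes.items():
--         if key_column is not None:
--             groups.setdefault(key_column, []).append(filename)
--     mergeable_pairs = []
--     for key_column, files in groups.items():
--         first, *rest = files
--         for other in rest:
--             mergeable_pairs.append((first, other, key_column))
--     return mergeable_pairs
-- ===== Notes on version B (the rewrite author's own statement) =====
-- stated objective: faster
-- what changed: Replaced the nested all-pairs scan with a merged-filenames set by a single pass that groups filenames by key column in a dict, then emits each group's first file paired with each of the rest.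
import Mathlib
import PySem

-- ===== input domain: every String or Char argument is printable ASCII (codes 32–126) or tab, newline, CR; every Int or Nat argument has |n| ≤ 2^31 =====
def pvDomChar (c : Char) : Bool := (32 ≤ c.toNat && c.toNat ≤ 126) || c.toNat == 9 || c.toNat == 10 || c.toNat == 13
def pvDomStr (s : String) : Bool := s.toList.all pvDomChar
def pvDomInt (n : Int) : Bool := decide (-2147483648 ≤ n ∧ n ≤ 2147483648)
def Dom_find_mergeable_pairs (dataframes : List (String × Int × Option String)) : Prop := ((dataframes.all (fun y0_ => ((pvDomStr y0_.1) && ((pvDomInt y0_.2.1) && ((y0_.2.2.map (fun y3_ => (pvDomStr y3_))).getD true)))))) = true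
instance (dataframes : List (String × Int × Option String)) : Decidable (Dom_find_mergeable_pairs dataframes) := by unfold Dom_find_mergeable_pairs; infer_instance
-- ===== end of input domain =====

-- B replaces A's nested all-pairs scan by one pass that groups filenames by key
-- column in a dict, then pairs each group's first file with the rest (objective: faster).

-- ===== PORT A =====
-- body of A's inner 'for filename2, (df2, key_column2) in dataframes.items()' loop
def pvInnerA (f1 : String) (k1 : Option String)
    (st : List (String × String × String) × PySem.Set String)
    (q : String × Int × Option String) : List (String × String × String) × PySem.Set String :=
  if f1 == q.1 then st
  else if k1 == q.2.2 && k1.isSome then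
    (st.1 ++ [(f1, q.1, k1.getD "")], PySem.Set.add (PySem.Set.add st.2 f1) q.1)
  else st

def find_mergeable_pairs (dataframes : List (String × Int × Option String)) : List (String × String × String) :=
  (dataframes.foldl
    (fun st p =>
      if PySem.Set.contains st.2 p.1 then st
      else dataframes.foldl (pvInnerA p.1 p.2.2) st)
    ([], PySem.Set.empty)).1

-- ===== PORT B =====
def find_mergeable_pairs_alt (dataframes : List (String × Int × Option String)) : List (String × String × String) :=
  let groups : PySem.Dict String (List String) :=
    dataframes.foldl
      (fun d p =>
        match p.2.2 with
        | some k => d.modify k [] (· ++ [p.1])   -- groups.setdefault(key_column, []).append(filename)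
        | none => d)
      PySem.Dict.empty
  groups.items.foldl
    (fun acc kv =>
      match kv.2 with                            -- first, *rest = files  (groups' lists are never empty)
      | [] => acc
      | first :: rest => acc ++ rest.map (fun o => (first, o, kv.1)))
    []

-- ===== PRECONDITION & SPEC =====
-- The argument encodes a Python dict keyed by filename; Pre_ excludes association
-- lists with duplicate filenames, which no Python dict can produce.
def Pre_find_mergeable_pairs (dataframes : List (String × Int × Option String)) : Prop :=
  (dataframes.map (·.1)).Nodup
instance (dataframes : List (String × Int × Option String)) : Decidable (Pre_find_mergeable_pairs dataframes) := by unfold Pre_find_mergeable_pairs; infer_instance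

def pvWitness_find_mergeable_pairs : (List (String × Int × Option String)) :=
  [("a.csv", 0, some "id"), ("b.csv", 1, some "id"), ("c.csv", 2, none)]

def Spec_find_mergeable_pairs (dataframes : List (String × Int × Option String)) (out : List (String × String × String)) : Prop := out = find_mergeable_pairs_alt dataframes
instance (dataframes : List (String × Int × Option String)) (out : List (String × String × String)) : Decidable (Spec_find_mergeable_pairs dataframes out) := by unfold Spec_find_mergeable_pairs; infer_instance

-- ===== CLAIM (what is proved, stated in full; the proofs are below) =====
def Claim_equal_find_mergeable_pairs : Prop := ∀ (dataframes : List (String × Int × Option String)), Dom_find_mergeable_pairs dataframes → Pre_find_mergeable_pairs dataframes → Spec_find_mergeable_pairs dataframes (find_mergeable_pairs dataframes)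

-- ===== LEMMAS AND PROOFS =====

-- keys of the input with None dropped, in order
def pvKeysOf (l : List (String × Int × Option String)) : List String := l.filterMap (·.2.2)

-- filenames whose key column is k, in order
def pvGrp (l : List (String × Int × Option String)) (k : String) : List String :=
  (l.filter (fun p => p.2.2 == some k)).map (·.1)

-- the pairs emitted for key k: the group's first file with each of the rest
def pvPairs (l : List (String × Int × Option String)) (k : String) : List (String × String × String) :=
  match pvGrp l k with
  | [] => []
  | f :: rest => rest.map (fun o => (f, o, k))

-- first occurrences of keys not already in K, in order
def pvNewS (K : List String) : List String → List String
  | [] => []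
  | k :: ks => if k ∈ K then pvNewS K ks else k :: pvNewS (k :: K) ks

-- the common reference value of both ports
def pvRef (l : List (String × Int × Option String)) : List (String × String × String) :=
  (pvNewS [] (pvKeysOf l)).flatMap (pvPairs l)

-- matches found by A's inner loop for file f1 with key k
def pvMt (l : List (String × Int × Option String)) (f1 : String) (k : String) : List String :=
  ((l.filter (fun q => !(f1 == q.1) && (some k == q.2.2))).map (·.1))

theorem pvNewS_congr : ∀ (ks K K' : List String), (∀ x, x ∈ K ↔ x ∈ K') →
    pvNewS K ks = pvNewS K' ks
  | [], _, _, _ => rfl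
  | k :: ks, K, K', h => by
    simp only [pvNewS]
    by_cases hk : k ∈ K
    · rw [if_pos hk, if_pos ((h k).mp hk)]
      exact pvNewS_congr ks K K' h
    · rw [if_neg hk, if_neg (fun c => hk ((h k).mpr c))]
      exact congrArg _ (pvNewS_congr ks _ _ (fun x => by
        simp only [List.mem_cons]; rw [h x]))

theorem pvFoldlAdd : ∀ (ks S K : List String), (∀ x, x ∈ S ↔ x ∈ K) →
    ks.foldl PySem.Set.add S = S ++ pvNewS K ks
  | [], S, K, h => by simp [pvNewS]
  | k :: ks, S, K, h => by
    simp only [List.foldl_cons, pvNewS]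
    by_cases hk : k ∈ K
    · have hs : k ∈ S := (h k).mpr hk
      have : PySem.Set.add S k = S := by
        simp [PySem.Set.add, PySem.Set.contains, hs]
      rw [if_pos hk, this]
      exact pvFoldlAdd ks S K h
    · have hs : k ∉ S := fun c => hk ((h k).mp c)
      have : PySem.Set.add S k = S ++ [k] := by
        simp [PySem.Set.add, PySem.Set.contains, hs]
      rw [if_neg hk, this, pvFoldlAdd ks (S ++ [k]) (k :: K)
        (fun x => by simp [h x, or_comm])]
      simp

theorem pvInnerA_none (f1 : String) (l : List (String × Int × Option String))
    (st : List (String × String × String) × PySem.Set String) :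
    l.foldl (pvInnerA f1 none) st = st := by
  induction l generalizing st with
  | nil => rfl
  | cons q r ih =>
    have h : pvInnerA f1 none st q = st := by
      simp [pvInnerA]
    rw [List.foldl_cons, h, ih]

theorem pvInnerA_fst (f1 k : String) (l : List (String × Int × Option String)) :
    ∀ st, (l.foldl (pvInnerA f1 (some k)) st).1
      = st.1 ++ (pvMt l f1 k).map (fun f2 => (f1, f2, k)) := by
  induction l with
  | nil => intro st; simp [pvMt]
  | cons q r ih =>
    intro st
    rw [List.foldl_cons]
    by_cases hf : f1 = q.1
    · have h : pvInnerA f1 (some k) st q = st := by simp [pvInnerA, hf]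
      rw [h, ih, pvMt, pvMt]
      simp [hf]
    · by_cases hk : some k = q.2.2
      · have h : pvInnerA f1 (some k) st q
            = (st.1 ++ [(f1, q.1, k)], PySem.Set.add (PySem.Set.add st.2 f1) q.1) := by
          simp [pvInnerA, hf, hk.symm, Option.getD]
        rw [h, ih, pvMt, pvMt]
        simp [hf, hk]
      · have h : pvInnerA f1 (some k) st q = st := by simp [pvInnerA, hf, hk]
        rw [h, ih, pvMt, pvMt]
        simp [hf, hk]

theorem pvInnerA_snd (f1 k : String) (l : List (String × Int × Option String)) :
    ∀ st x, x ∈ (l.foldl (pvInnerA f1 (some k)) st).2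
      ↔ x ∈ st.2 ∨ (pvMt l f1 k ≠ [] ∧ x = f1) ∨ x ∈ pvMt l f1 k := by
  induction l with
  | nil => intro st x; simp [pvMt]
  | cons q r ih =>
    intro st x
    rw [List.foldl_cons]
    by_cases hf : f1 = q.1
    · have h : pvInnerA f1 (some k) st q = st := by simp [pvInnerA, hf]
      rw [h, ih]
      have : pvMt (q :: r) f1 k = pvMt r f1 k := by simp [pvMt, hf]
      rw [this]
    · by_cases hk : some k = q.2.2
      · have h : pvInnerA f1 (some k) st q
            = (st.1 ++ [(f1, q.1, k)], PySem.Set.add (PySem.Set.add st.2 f1) q.1) := by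
          simp [pvInnerA, hf, hk.symm, Option.getD]
        have hm : pvMt (q :: r) f1 k = q.1 :: pvMt r f1 k := by simp [pvMt, hf, hk]
        rw [h, ih, hm]
        simp only [PySem.Set.mem_add, List.mem_cons]
        constructor
        · rintro (((h1 | h1) | h1) | h1 | h1) <;> tauto
        · intro h1
          rcases h1 with h1 | ⟨_, h1⟩ | h1 | h1 <;> tauto
      · have h : pvInnerA f1 (some k) st q = st := by simp [pvInnerA, hf, hk]
        have hm : pvMt (q :: r) f1 k = pvMt r f1 k := by simp [pvMt, hf, hk]
        rw [h, ih, hm]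

theorem pvMemKeysOf (pre : List (String × Int × Option String)) (k : String) :
    k ∈ pvKeysOf pre ↔ ∃ q ∈ pre, q.2.2 = some k := by
  simp [pvKeysOf, List.mem_filterMap]

theorem pvMemGrp (l : List (String × Int × Option String)) (k x : String) :
    x ∈ pvGrp l k ↔ ∃ q ∈ l, q.2.2 = some k ∧ q.1 = x := by
  simp only [pvGrp, List.mem_map, List.mem_filter]
  constructor
  · rintro ⟨q, ⟨hq, hk⟩, hx⟩
    exact ⟨q, hq, by simpa using hk, hx⟩
  · rintro ⟨q, hq, hk, hx⟩
    exact ⟨q, ⟨hq, by simpa using hk⟩, hx⟩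

-- A's outer loop, peeled to an arbitrary suffix r with invariant on the merged set
theorem pvMain (l : List (String × Int × Option String)) (hnd : (l.map (·.1)).Nodup) :
    ∀ (r pre : List (String × Int × Option String)) (acc : List (String × String × String))
      (m : PySem.Set String), l = pre ++ r →
      (∀ x, x ∈ m ↔ ∃ k, k ∈ pvKeysOf pre ∧ 2 ≤ (pvGrp l k).length ∧ x ∈ pvGrp l k) →
      (r.foldl
        (fun st p =>
          if PySem.Set.contains st.2 p.1 then st
          else l.foldl (pvInnerA p.1 p.2.2) st)
        (acc, m)).1
      = acc ++ (pvNewS (pvKeysOf pre) (pvKeysOf r)).flatMap (pvPairs l) := by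
  intro r
  induction r with
  | nil =>
    intro pre acc m _ _
    simp [pvKeysOf, pvNewS]
  | cons p r' ih =>
    intro pre acc m hl hInv
    rcases p with ⟨f1, n, ko⟩
    rw [List.foldl_cons]
    cases ko with
    | none =>
      have hkeys' : pvKeysOf (pre ++ [(f1, n, none)]) = pvKeysOf pre := by
        simp [pvKeysOf]
      have := ih (pre ++ [(f1, n, none)]) acc m
        (by rw [hl, List.append_assoc]; rfl)
        (by intro x; rw [hInv x, hkeys'])
      rw [hkeys'] at this
      simpa [pvKeysOf, pvInnerA_none, ite_self] using this
    | some k =>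
      have hp_mem : ((f1, n, some k) : String × Int × Option String) ∈ l := by
        rw [hl]; exact List.mem_append_right _ (List.mem_cons_self ..)
      have hf1grp : f1 ∈ pvGrp l k := (pvMemGrp l k f1).mpr ⟨_, hp_mem, rfl, rfl⟩
      have hkeys' : pvKeysOf (pre ++ [(f1, n, some k)]) = pvKeysOf pre ++ [k] := by
        simp [pvKeysOf]
      have hkeysr : pvKeysOf ((f1, n, some k) :: r') = k :: pvKeysOf r' := by
        simp [pvKeysOf]
      by_cases hk : k ∈ pvKeysOf pre
      · -- key already seen: f1 is already in the merged set, A skips it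
        have hlen : 2 ≤ (pvGrp l k).length := by
          obtain ⟨q, hq, hqk⟩ := (pvMemKeysOf pre k).mp hk
          have h1 : q.1 ∈ pvGrp pre k := (pvMemGrp pre k q.1).mpr ⟨q, hq, hqk, rfl⟩
          have hdecomp : pvGrp l k = pvGrp pre k ++ f1 :: pvGrp r' k := by
            rw [hl]; simp [pvGrp, List.filter_append]
          rw [hdecomp]
          have : 1 ≤ (pvGrp pre k).length := List.length_pos_iff.mpr (fun c => by simp [c] at h1)
          simp only [List.length_append, List.length_cons]
          omega
        have hf1m : f1 ∈ m := (hInv f1).mpr ⟨k, hk, hlen, hf1grp⟩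
        have hc : PySem.Set.contains m f1 = true := by
          simpa [PySem.Set.contains] using hf1m
        rw [hc, if_pos rfl]
        have := ih (pre ++ [(f1, n, some k)]) acc m
          (by rw [hl, List.append_assoc]; rfl)
          (by
            intro x; rw [hInv x]
            constructor
            · rintro ⟨k', h1, h2⟩
              exact ⟨k', by rw [hkeys']; exact List.mem_append_left _ h1, h2⟩
            · rintro ⟨k', h1, h2⟩
              rw [hkeys'] at h1
              rcases List.mem_append.mp h1 with h1 | h1
              · exact ⟨k', h1, h2⟩
              · exact ⟨k', by simpa using (List.mem_singleton.mp h1) ▸ hk, h2⟩)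
        rw [this, hkeys', hkeysr]
        rw [pvNewS, if_pos hk]
        rw [pvNewS_congr (pvKeysOf r') (pvKeysOf pre) (pvKeysOf pre ++ [k])
          (by intro x; simp; intro h; exact (h ▸ hk))]
      · -- fresh key: A fires, pairing f1 with the rest of its group
        have hpre0 : pre.filter (fun q => q.2.2 == some k) = [] := by
          rw [List.filter_eq_nil_iff]
          intro q hq hqk
          exact hk ((pvMemKeysOf pre k).mpr ⟨q, hq, by simpa using hqk⟩)
        have hgrp : pvGrp l k = f1 :: pvGrp r' k := by
          rw [hl]; simp [pvGrp, List.filter_append, hpre0]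
        have hf1r' : f1 ∉ r'.map (·.1) := by
          rw [hl] at hnd
          simp only [List.map_append, List.map_cons] at hnd
          have := (List.nodup_append.mp hnd).2.1
          exact (List.nodup_cons.mp this).1
        have hmt : pvMt l f1 k = pvGrp r' k := by
          rw [hl]
          unfold pvMt
          rw [List.filter_append, List.filter_cons]
          have h1 : pre.filter (fun q => !(f1 == q.1) && (some k == q.2.2)) = [] := by
            rw [List.filter_eq_nil_iff]
            intro q hq hqc
            simp only [Bool.and_eq_true, beq_iff_eq] at hqc
            exact hk ((pvMemKeysOf pre k).mpr ⟨q, hq, hqc.2.symm⟩)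
          have h2 : (!(f1 == (f1, n, some k).1) && (some k == (f1, n, some k).2.2)) = false := by
            simp
          have h3 : r'.filter (fun q => !(f1 == q.1) && (some k == q.2.2))
              = r'.filter (fun q => q.2.2 == some k) := by
            apply List.filter_congr
            intro q hq
            have : f1 ≠ q.1 := fun c => hf1r' (List.mem_map.mpr ⟨q, hq, c.symm⟩)
            by_cases hqk : q.2.2 = some k
            · simp [this, hqk]
            · rw [Bool.eq_iff_iff]
              simp [this, hqk, Ne.symm hqk]
          rw [h1, h2, h3]
          simp [pvGrp]
        have hf1nm : f1 ∉ m := by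
          intro hin
          obtain ⟨k', hk', _, hx⟩ := (hInv f1).mp hin
          obtain ⟨q, hq, hqk, hq1⟩ := (pvMemGrp l k' f1).mp hx
          have : q = (f1, n, some k) :=
            List.inj_on_of_nodup_map hnd hq hp_mem (by simpa using hq1)
          rw [this] at hqk
          exact hk (by
            have : k' = k := by simpa using hqk.symm
            exact this ▸ hk')
        have hc : PySem.Set.contains m f1 = false := by
          simp only [PySem.Set.contains]
          simpa using hf1nm
        rw [hc, if_neg (by simp)]
        set st1 := l.foldl (pvInnerA f1 (some k)) (acc, m) with hst1
        have hacc1 : st1.1 = acc ++ pvPairs l k := by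
          rw [hst1, pvInnerA_fst, hmt]
          simp [pvPairs, hgrp]
        have hm1 : ∀ x, x ∈ st1.2 ↔ x ∈ m ∨ (pvGrp r' k ≠ [] ∧ x = f1) ∨ x ∈ pvGrp r' k := by
          intro x
          rw [hst1, pvInnerA_snd, hmt]
        have hInv' : ∀ x, x ∈ st1.2 ↔ ∃ k', k' ∈ pvKeysOf (pre ++ [(f1, n, some k)])
            ∧ 2 ≤ (pvGrp l k').length ∧ x ∈ pvGrp l k' := by
          intro x
          rw [hm1 x, hkeys']
          constructor
          · rintro (h1 | ⟨hne, rfl⟩ | h1)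
            · obtain ⟨k', h2, h3⟩ := (hInv x).mp h1
              exact ⟨k', List.mem_append_left _ h2, h3⟩
            · refine ⟨k, List.mem_append_right _ (List.mem_singleton.mpr rfl), ?_, hf1grp⟩
              rw [hgrp]
              have : 1 ≤ (pvGrp r' k).length := List.length_pos_iff.mpr hne
              simp only [List.length_cons]; omega
            · refine ⟨k, List.mem_append_right _ (List.mem_singleton.mpr rfl), ?_, ?_⟩
              · rw [hgrp]
                have : 1 ≤ (pvGrp r' k).length := List.length_pos_iff.mpr (fun c => by simp [c] at h1)
                simp only [List.length_cons]; omega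
              · rw [hgrp]; exact List.mem_cons_of_mem _ h1
          · rintro ⟨k', h1, h2, h3⟩
            rcases List.mem_append.mp h1 with h1 | h1
            · exact Or.inl ((hInv x).mpr ⟨k', h1, h2, h3⟩)
            · have hkk : k' = k := List.mem_singleton.mp h1
              subst hkk
              rw [hgrp] at h2 h3
              rcases List.mem_cons.mp h3 with h3 | h3
              · refine Or.inr (Or.inl ⟨?_, h3⟩)
                intro c
                rw [c] at h2; simp at h2
              · exact Or.inr (Or.inr h3)
        have hres := ih (pre ++ [(f1, n, some k)]) st1.1 st1.2
          (by rw [hl, List.append_assoc]; rfl) hInv'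
        rw [Prod.mk.eta] at hres
        rw [hres, hacc1, hkeys', hkeysr]
        rw [pvNewS, if_neg hk]
        rw [pvNewS_congr (pvKeysOf r') (k :: pvKeysOf pre) (pvKeysOf pre ++ [k])
          (by intro x; simp [or_comm])]
        simp [List.append_assoc]

theorem pvA_eq_ref (l : List (String × Int × Option String)) (hnd : (l.map (·.1)).Nodup) :
    find_mergeable_pairs l = pvRef l := by
  unfold find_mergeable_pairs
  rw [pvMain l hnd l [] [] PySem.Set.empty rfl
    (by intro x; simp [pvKeysOf, PySem.Set.empty])]
  simp [pvRef, pvKeysOf]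

def pvKV (p : String × Int × Option String) : Option (String × String) :=
  p.2.2.map (fun k => (k, p.1))

theorem pvGroupsEq : ∀ (l : List (String × Int × Option String)) (d : PySem.Dict String (List String)),
    l.foldl (fun d p =>
        match p.2.2 with
        | some k => d.modify k [] (· ++ [p.1])
        | none => d) d
    = (l.filterMap pvKV).foldl (fun d q => d.modify q.1 [] (· ++ [q.2])) d
  | [], d => rfl
  | p :: r, d => by
    rcases p with ⟨f, n, k⟩
    cases k with
    | none => simpa [pvKV] using pvGroupsEq r d
    | some k => simpa [pvKV] using pvGroupsEq r (d.modify k [] (· ++ [f]))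

theorem pvKVkeys (l : List (String × Int × Option String)) :
    (l.filterMap pvKV).map (·.1) = pvKeysOf l := by
  simp [pvKV, pvKeysOf, List.map_filterMap, Option.map_map, Function.comp_def]

theorem pvKVgrp (k : String) : ∀ (l : List (String × Int × Option String)),
    ((l.filterMap pvKV).filter (fun q => q.1 == k)).map (·.2) = pvGrp l k
  | [] => rfl
  | p :: r => by
    rcases p with ⟨f, n, ko⟩
    cases ko with
    | none => simpa [pvKV, pvGrp] using pvKVgrp k r
    | some k' =>
      by_cases h : k' = k
      · simp only [pvKV, pvGrp] at *
        simpa [h] using pvKVgrp k r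
      · simp only [pvKV, pvGrp] at *
        simpa [h] using pvKVgrp k r

theorem pvB_eq_ref (l : List (String × Int × Option String)) :
    find_mergeable_pairs_alt l = pvRef l := by
  show ((l.foldl
      (fun d p =>
        match p.2.2 with
        | some k => d.modify k [] (· ++ [p.1])
        | none => d)
      PySem.Dict.empty).items).foldl
    (fun acc kv =>
      match kv.2 with
      | [] => acc
      | first :: rest => acc ++ rest.map (fun o => (first, o, kv.1)))
    [] = pvRef l
  rw [pvGroupsEq]
  set l' := l.filterMap pvKV with hl'
  set groups := l'.foldl (fun d q => d.modify q.1 [] (· ++ [q.2])) PySem.Dict.empty with hg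
  have hnd : groups.keys.Nodup := by
    rw [hg]
    exact PySem.Dict.nodup_keys_foldl_modify_key l' (·.1) [] (fun _ q => (· ++ [q.2]))
      PySem.Dict.empty (by simp [PySem.Dict.keys_empty])
  have hkeys : groups.keys = pvNewS [] (pvKeysOf l) := by
    rw [hg, PySem.Dict.keys_foldl_modify_key l' (·.1) [] (fun _ q => (· ++ [q.2]))]
    show PySem.Set.update PySem.Dict.empty.keys (l'.map (·.1)) = _
    rw [pvKVkeys]
    show (pvKeysOf l).foldl PySem.Set.add PySem.Dict.empty.keys = _
    rw [pvFoldlAdd (pvKeysOf l) PySem.Dict.empty.keys []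
      (by simp [PySem.Dict.keys_empty])]
    simp [PySem.Dict.keys_empty]
  have hgetD : ∀ k, groups.getD k [] = pvGrp l k := by
    intro k
    rw [hg, PySem.Dict.getD_foldl_modify_append]
    simp only [PySem.Dict.getD_empty, List.nil_append]
    exact pvKVgrp k l
  have hitems : groups.items = (pvNewS [] (pvKeysOf l)).map (fun k => (k, pvGrp l k)) := by
    rw [PySem.Dict.items_eq_map_keys groups hnd [], hkeys]
    exact List.map_congr_left (fun k _ => by rw [hgetD k])
  rw [hitems]
  rw [PySem.List.foldl_congr_mem _ _
    (fun acc kv => acc ++ (match kv.2 with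
      | [] => []
      | first :: rest => rest.map (fun o => (first, o, kv.1)))) []
    (by intro acc kv _; rcases kv with ⟨k, files⟩; cases files <;> simp)]
  rw [PySem.List.foldl_append_eq_flatMap]
  rw [List.flatMap_map]
  unfold pvRef
  apply List.flatMap_congr
  intro k _
  rfl

-- ===== VERDICT (by name: the statement is the Claim_ definition above) =====
theorem find_mergeable_pairs_spec : Claim_equal_find_mergeable_pairs := by
  intro l _ hpre
  unfold Spec_find_mergeable_pairs
  rw [pvA_eq_ref l hpre, pvB_eq_ref l]
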